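-- pv_equiv track=rewrite | github.com/sammyfilly/stem | stem/manual.py | _get_indented_descriptions
-- ===== SOURCE A (Python) =====
-- import collections
-- from typing import Any, BinaryIO, Dict, List, Mapping, Optional, Sequence, Tuple, Union
--
-- def _get_indented_descriptions(lines: Sequence[str]) -> Dict[str, str]:
--   """
--   Parses the commandline argument and signal sections. These are options
--   followed by an indented description. For example...
--
--   ::
--
--     -f FILE
--         Specify a new configuration file to contain further Tor configuration
--         options OR pass - to make Tor read its configuration from standard
--         input. (Default: /usr/local/etc/tor/torrc, or $HOME/.torrc if that file
--         is not found)
--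
--   There can be additional paragraphs not related to any particular argument but
--   ignoring those.
--   """
--
--   options = collections.OrderedDict()  # type: collections.OrderedDict[str, List[str]]
--   last_arg = None
--
--   for line in lines:
--     if line == '    Note':
--       last_arg = None  # manual has several indented 'Note' blocks
--     elif line and not line.startswith(' '):
--       options[line], last_arg = [], line
--     elif last_arg and line.startswith('    '):
--       options[last_arg].append(line[4:])
--
--   return dict([(arg, ' '.join(desc_lines)) for arg, desc_lines in options.items() if desc_lines])
-- ===== SOURCE B (Python) =====
-- def _get_indented_descriptions(lines):
--   # Segment lines into (header, body) sections, then scan each body once.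
--   sections = []
--   i, n = 0, len(lines)
--   while i < n and (not lines[i] or lines[i].startswith(' ')):
--     i += 1  # preamble before the first header is ignored
--   while i < n:
--     header = lines[i]
--     i += 1
--     body = []
--     while i < n and (not lines[i] or lines[i].startswith(' ')):
--       body.append(lines[i])
--       i += 1
--     sections.append((header, body))
--
--   result = {}
--   for header, body in sections:
--     desc = []
--     for ln in body:
--       if ln == '    Note':
--         break
--       if ln.startswith('    '):
--         desc.append(ln[4:])
--     result[header] = desc  # overwrite keeps first-insertion position, like A
--
--   return {h: ' '.join(d) for h, d in result.items() if d}
-- ===== Notes on version B (the rewrite author's own statement) =====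
-- stated objective: alternative
-- what changed: A is a single flat pass with a (dict, last_arg) state machine; B first segments the lines into (header, body) sections with nested scans (takeWhile/dropWhile of body lines), then builds each description by one scan of the section body that stops at ' Note'.
import Mathlib
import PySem

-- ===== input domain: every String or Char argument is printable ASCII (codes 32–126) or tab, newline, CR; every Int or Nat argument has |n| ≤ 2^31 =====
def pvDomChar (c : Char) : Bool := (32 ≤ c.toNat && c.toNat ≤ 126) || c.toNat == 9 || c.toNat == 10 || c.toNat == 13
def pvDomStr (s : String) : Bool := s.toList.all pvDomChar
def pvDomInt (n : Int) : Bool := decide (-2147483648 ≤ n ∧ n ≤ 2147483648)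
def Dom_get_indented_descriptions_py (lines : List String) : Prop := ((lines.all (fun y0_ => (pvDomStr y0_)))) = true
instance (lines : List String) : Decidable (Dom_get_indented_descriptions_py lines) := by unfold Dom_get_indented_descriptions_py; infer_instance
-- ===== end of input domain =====

-- B re-decomposes A's flat state-machine pass into segment-then-scan (split at headers, then scan
-- each section body); same return value, objective: alternative decomposition.

-- ===== PORT A =====
-- the body of A's for-loop over `lines`, on state (options, last_arg)
def stepA (s : PySem.Dict String (List String) × Option String) (line : String) :
    PySem.Dict String (List String) × Option String :=
  if line = "    Note" then (s.1, none)
  else if line ≠ "" ∧ PySem.Str.startswith line " " = false then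
    (s.1.insert line [], some line)
  else match s.2 with
    | some a =>
        if PySem.Str.startswith line "    " then
          (s.1.modify a [] (· ++ [PySem.Str.slice line (some 4) none]), s.2)
        else s
    | none => s

def get_indented_descriptions_py (lines : List String) : List (String × String) :=
  ((lines.foldl stepA (PySem.Dict.empty, none)).1.items.filter
      (fun p => !p.2.isEmpty)).map (fun p => (p.1, PySem.Str.join " " p.2))

-- ===== PORT B =====
-- `not line or line.startswith(' ')` — a line that belongs to a section body
def altIsBody (line : String) : Bool := line = "" || PySem.Str.startswith line " "

-- the two nested while-loops of Source B: split into (header, body) sections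
def altSections : List String → List (String × List String)
  | [] => []
  | h :: rest => (h, rest.takeWhile altIsBody) :: altSections (rest.dropWhile altIsBody)
  termination_by l => l.length
  decreasing_by
    simp only [List.length_cons]
    exact Nat.lt_succ_of_le (List.length_dropWhile_le _ _)

-- the inner for-loop of Source B: collect stripped description lines, stop at '    Note'
def altDesc : List String → List String
  | [] => []
  | ln :: rest =>
      if ln = "    Note" then []
      else if PySem.Str.startswith ln "    " then
        PySem.Str.slice ln (some 4) none :: altDesc rest
      else altDesc rest

def get_indented_descriptions_py_alt (lines : List String) : List (String × String) :=
  (((altSections (lines.dropWhile altIsBody)).foldl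
      (fun (d : PySem.Dict String (List String)) s => d.insert s.1 (altDesc s.2))
      PySem.Dict.empty).items.filter
    (fun p => !p.2.isEmpty)).map (fun p => (p.1, PySem.Str.join " " p.2))

-- ===== PRECONDITION & SPEC =====
def Spec_get_indented_descriptions_py (lines : List String) (out : List (String × String)) : Prop := out = get_indented_descriptions_py_alt lines
instance (lines : List String) (out : List (String × String)) : Decidable (Spec_get_indented_descriptions_py lines out) := by unfold Spec_get_indented_descriptions_py; infer_instance

-- ===== CLAIM (what is proved, stated in full; the proofs are below) =====
def Claim_equal_get_indented_descriptions_py : Prop := ∀ (lines : List String), Dom_get_indented_descriptions_py lines → Spec_get_indented_descriptions_py lines (get_indented_descriptions_py lines)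

-- ===== LEMMAS AND PROOFS =====

-- the head of a dropWhile fails the predicate
theorem head_dropWhile_false {α : Type} (p : α → Bool) (l : List α) (x : α) (xs : List α)
    (h : l.dropWhile p = x :: xs) : p x = false := by
  induction l with
  | nil => simp at h
  | cons a t ih =>
      rw [List.dropWhile_cons] at h
      split at h
      · exact ih h
      · rename_i hpa
        simp only [List.cons.injEq] at h
        obtain ⟨rfl, -⟩ := h
        simpa using hpa

-- a body line fails A's header test
theorem not_header_of_isBody (x : String) (hx : altIsBody x = true) :
    ¬ (x ≠ "" ∧ PySem.Str.startswith x " " = false) := by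
  simp only [altIsBody, Bool.or_eq_true, decide_eq_true_eq] at hx
  rcases hx with h1 | h1
  · simp [h1]
  · exact fun hc => Bool.noConfusion (h1.symm.trans hc.2)

-- body lines are no-ops for A's loop while last_arg is None
theorem foldl_body_none (b : List String) (hb : ∀ x ∈ b, altIsBody x = true)
    (d : PySem.Dict String (List String)) :
    b.foldl stepA (d, none) = (d, none) := by
  induction b with
  | nil => rfl
  | cons x t ih =>
      have hstep : stepA (d, none) x = (d, none) := by
        by_cases hnote : x = "    Note"
        · simp only [stepA]; rw [if_pos hnote]
        · simp only [stepA]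
          rw [if_neg hnote, if_neg (not_header_of_isBody x (hb x (by simp)))]
      rw [List.foldl_cons, hstep]
      exact ih (fun y hy => hb y (by simp [hy]))

-- appending to a freshly written key of a dict
theorem modify_append_insert (d : PySem.Dict String (List String)) (a : String)
    (v : List String) (x : String) :
    (d.insert a v).modify a [] (· ++ [x]) = d.insert a (v ++ [x]) := by
  simp [PySem.Dict.modify, PySem.Dict.getD_insert_self, PySem.Dict.insert_insert_self]

-- A's loop over a run of body lines, with last_arg = Some a and a freshly (re)set entry
theorem foldl_body_some (b : List String) (hb : ∀ x ∈ b, altIsBody x = true)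
    (d : PySem.Dict String (List String)) (a : String) (v : List String) :
    b.foldl stepA (d.insert a v, some a) =
      (d.insert a (v ++ altDesc b), if "    Note" ∈ b then none else some a) := by
  induction b generalizing v with
  | nil => simp [altDesc]
  | cons x t ih =>
      have hbt : ∀ y ∈ t, altIsBody y = true := fun y hy => hb y (by simp [hy])
      by_cases hnote : x = "    Note"
      · have hstep : stepA (d.insert a v, some a) x = (d.insert a v, none) := by
          simp only [stepA]; rw [if_pos hnote]
        rw [List.foldl_cons, hstep, foldl_body_none t hbt]
        simp only [altDesc]
        rw [if_pos hnote, if_pos (by simp [hnote])]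
        simp
      · have hhdr := not_header_of_isBody x (hb x (by simp))
        have hmem : ("    Note" ∈ x :: t) ↔ ("    Note" ∈ t) := by
          simp [List.mem_cons, Ne.symm hnote]
        by_cases hind : PySem.Str.startswith x "    " = true
        · have hstep : stepA (d.insert a v, some a) x =
              (d.insert a (v ++ [PySem.Str.slice x (some 4) none]), some a) := by
            simp only [stepA]
            rw [if_neg hnote, if_neg hhdr, if_pos hind, modify_append_insert]
          rw [List.foldl_cons, hstep, ih hbt]
          simp only [altDesc]
          rw [if_neg hnote, if_pos hind, if_congr hmem rfl rfl, List.append_assoc]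
          rfl
        · have hstep : stepA (d.insert a v, some a) x = (d.insert a v, some a) := by
            simp only [stepA]
            rw [if_neg hnote, if_neg hhdr, if_neg hind]
          rw [List.foldl_cons, hstep, ih hbt]
          simp only [altDesc]
          rw [if_neg hnote, if_neg hind, if_congr hmem rfl rfl]

-- main invariant: starting at a header (or at the end), A's loop computes B's section fold
theorem foldl_sections (ls : List String)
    (hh : ∀ h ∈ ls.head?, altIsBody h = false) :
    ∀ (d : PySem.Dict String (List String)) (L : Option String),
      (ls.foldl stepA (d, L)).1 =
        (altSections ls).foldl (fun d s => d.insert s.1 (altDesc s.2)) d := by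
  induction ls using altSections.induct with
  | case1 => intro d L; simp [altSections]
  | case2 h rest ih =>
      intro d L
      have hhd : altIsBody h = false := hh h (by simp)
      have hnote : ¬ h = "    Note" := by
        intro he; subst he
        exact (by decide : altIsBody "    Note" ≠ false) hhd
      have hhdr : h ≠ "" ∧ PySem.Str.startswith h " " = false := by
        simp only [altIsBody, Bool.or_eq_false_iff, decide_eq_false_iff_not] at hhd
        exact hhd
      have hstep : stepA (d, L) h = (d.insert h [], some h) := by
        cases L <;> · simp only [stepA]; rw [if_neg hnote, if_pos hhdr]
      have htw : ∀ x ∈ rest.takeWhile altIsBody, altIsBody x = true :=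
        fun x hx => List.mem_takeWhile_imp hx
      have hdw : ∀ h' ∈ (rest.dropWhile altIsBody).head?, altIsBody h' = false := by
        intro h' hh'
        cases hcase : rest.dropWhile altIsBody with
        | nil => simp [hcase] at hh'
        | cons y ys =>
            simp only [hcase, List.head?_cons, Option.mem_some_iff] at hh'
            subst hh'
            exact head_dropWhile_false altIsBody rest _ _ hcase
      rw [List.foldl_cons, hstep]
      conv_lhs => rw [(List.takeWhile_append_dropWhile (p := altIsBody) (l := rest)).symm]
      rw [List.foldl_append, foldl_body_some _ htw d h []]
      rw [altSections, List.foldl_cons]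
      simp only [List.nil_append]
      split
      · exact ih hdw _ _
      · exact ih hdw _ _

-- ===== VERDICT (by name: the statement is the Claim_ definition above) =====
theorem get_indented_descriptions_py_spec : Claim_equal_get_indented_descriptions_py := by
  intro lines _
  unfold Spec_get_indented_descriptions_py get_indented_descriptions_py get_indented_descriptions_py_alt
  have htw : ∀ x ∈ lines.takeWhile altIsBody, altIsBody x = true :=
    fun x hx => List.mem_takeWhile_imp hx
  have hdw : ∀ h' ∈ (lines.dropWhile altIsBody).head?, altIsBody h' = false := by
    intro h' hh'
    cases hcase : lines.dropWhile altIsBody with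
    | nil => simp [hcase] at hh'
    | cons y ys =>
        simp only [hcase, List.head?_cons, Option.mem_some_iff] at hh'
        subst hh'
        exact head_dropWhile_false altIsBody lines _ _ hcase
  have hmain : (lines.foldl stepA (PySem.Dict.empty, none)).1 =
      (altSections (lines.dropWhile altIsBody)).foldl
        (fun d s => d.insert s.1 (altDesc s.2)) PySem.Dict.empty := by
    conv_lhs => rw [(List.takeWhile_append_dropWhile (p := altIsBody) (l := lines)).symm]
    rw [List.foldl_append, foldl_body_none _ htw]
    exact foldl_sections _ hdw _ _
  rw [hmain]
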